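-- pv_equiv track=rewrite | github.com/kensho-technologies/kenverters | kensho_kenverters/convert_output_visual_formatted.py | _clean_page_text_arr
-- ===== SOURCE A (Python) =====
-- def _non_blank_line(text_line_str: str) -> bool:
--     """Check if line is not blank."""
--     return any(line.strip() for line in text_line_str)
--
-- def _num_left_white_spaces(text_line_list: list[str]) -> int:
--     """Check how many spaces are on the lefthand side of the text for later cleaning purposes."""
--     last_left_space_index = 0
--     for char in text_line_list:
--         if char == " ":
--             last_left_space_index += 1
--         # Word has started
--         else:
--             break
--     return last_left_space_index
--
-- def _clean_page_text_arr(text_arr: list[list[str]]) -> str: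
--     """Take in a 2D array of a page, with char text lines, and convert it to one page string."""
--     # Remove as much left white space as possible without changing relative positions
--     num_left_spaces = min(_num_left_white_spaces(text_line) for text_line in text_arr)
--
--     page_line_texts_list = []
--     previous_is_blank = False
--     for text_line in text_arr:
--         # Put all chars in that line together
--         line_text = "".join(text_line[num_left_spaces:]).rstrip()
--         # Remove multiple consecutive blank lines and keep only one
--         line_not_blank = _non_blank_line(line_text)
--         if line_not_blank or not previous_is_blank:
--             page_line_texts_list.append(line_text)
--
--         # Update previous line is blank
--         if line_not_blank:
--             previous_is_blank = False
--         else: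
--             previous_is_blank = True
--
--     # Combine all lines with a new line character
--     page_lines_str = "\n".join(page_line_texts_list).rstrip()
--
--     # End of page
--     page_lines_str += (
--         "\n"
--         + "======================================================================================="
--     )
--     return page_lines_str
-- ===== SOURCE B (Python) =====
-- def _num_left_white_spaces(text_line_list: list[str]) -> int:
--     """Check how many spaces are on the lefthand side of the text for later cleaning purposes."""
--     last_left_space_index = 0
--     for char in text_line_list:
--         if char == " ":
--             last_left_space_index += 1
--         else:
--             break
--     return last_left_space_index
--
--
-- def _split_runs(lines: list[str]) -> list[tuple[bool, list[str]]]: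
--     """Split lines into maximal consecutive runs sharing the same blankness."""
--     runs: list[tuple[bool, list[str]]] = []
--     for line in lines:
--         blank = not line
--         if runs and runs[-1][0] == blank:
--             runs[-1][1].append(line)
--         else:
--             runs.append((blank, [line]))
--     return runs
--
--
-- def _clean_page_text_arr(text_arr: list[list[str]]) -> str:
--     """Take in a 2D array of a page, with char text lines, and convert it to one page string."""
--     offset = min(_num_left_white_spaces(line) for line in text_arr)
--     cleaned = ["".join(line[offset:]).rstrip() for line in text_arr]
--     # Collapse every run of blank lines to a single empty line; keep non-blank runs whole.
--     kept: list[str] = []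
--     for blank, run in _split_runs(cleaned):
--         kept.extend([""] if blank else run)
--     return "\n".join(kept).rstrip() + "\n" + "=" * 87
-- ===== Notes on version B (the rewrite author's own statement) =====
-- stated objective: alternative
-- what changed: Replaced the online previous_is_blank state machine by a staged pipeline: clean all lines, split them into maximal runs of equal blankness (a grouped intermediate structure), then emit each non-blank run whole and each blank run as a single empty line.
import Mathlib
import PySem

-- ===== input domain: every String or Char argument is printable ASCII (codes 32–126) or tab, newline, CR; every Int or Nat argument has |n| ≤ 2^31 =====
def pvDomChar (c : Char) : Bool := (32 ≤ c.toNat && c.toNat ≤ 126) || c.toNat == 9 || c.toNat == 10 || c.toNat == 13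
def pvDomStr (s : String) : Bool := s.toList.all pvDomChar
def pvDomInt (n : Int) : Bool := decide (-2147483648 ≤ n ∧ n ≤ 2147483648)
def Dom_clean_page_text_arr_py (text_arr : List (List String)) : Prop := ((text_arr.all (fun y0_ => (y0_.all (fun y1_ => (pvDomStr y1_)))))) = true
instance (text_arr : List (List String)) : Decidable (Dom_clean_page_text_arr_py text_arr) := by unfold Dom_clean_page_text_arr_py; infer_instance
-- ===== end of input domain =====

-- B replaces the previous_is_blank state machine by a staged pipeline: clean all lines, split
-- them into maximal runs of equal blankness, then emit non-blank runs whole and blank runs as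
-- one empty line (objective: alternative decomposition, same cost).


-- ===== PORT A =====
-- any(line.strip() for line in text_line_str): some char of the string is non-whitespace
def pvNonBlankLine (s : String) : Bool :=
  s.toList.any (fun c => !(PySem.Chars.strip [c]).isEmpty)

-- the counting loop over leading " " elements (break = stop recursion)
def pvNumLeftWhiteSpaces : List String → Int
  | [] => 0
  | c :: rest => if c == " " then 1 + pvNumLeftWhiteSpaces rest else 0

-- "".join(text_line[num_left_spaces:]).rstrip()
def pvCleanLine (n : Int) (line : List String) : String :=
  PySem.Str.rstrip (PySem.Str.join "" (PySem.List.slice line (some n) none))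

-- the main loop, state = (page_line_texts_list, previous_is_blank)
def pvLoopA (n : Int) : List (List String) → List String → Bool → List String
  | [], acc, _ => acc
  | line :: rest, acc, prev =>
    let t := pvCleanLine n line
    let nb := pvNonBlankLine t
    pvLoopA n rest (if nb || !prev then acc ++ [t] else acc) (!nb)

def pvSeparator : String := "======================================================================================="

def clean_page_text_arr_py (text_arr : List (List String)) : String :=
  match PySem.List.min? (text_arr.map pvNumLeftWhiteSpaces) (fun x => x) with
  | none => ""   -- unreachable: Python's min raises ValueError on an empty text_arr (excluded by Pre_)
  | some n =>
    PySem.Str.rstrip (PySem.Str.join "\n" (pvLoopA n text_arr [] false)) ++ "\n" ++ pvSeparator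

-- ===== PORT B =====
-- B's _num_left_white_spaces (same helper code as A's, per B's source)
def pvNumLeftB : List String → Int
  | [] => 0
  | c :: rest => if c == " " then 1 + pvNumLeftB rest else 0

-- runs[-1][1].append(line) / runs.append((blank, [line])): one step of B's run-building loop
def pvPushLine (runs : List (Bool × List String)) (line : String) : List (Bool × List String) :=
  let blank := line == ""
  match runs.getLast? with
  | some (b, run) =>
    if b == blank then runs.dropLast ++ [(b, run ++ [line])] else runs ++ [(blank, [line])]
  | none => [(blank, [line])]

-- _split_runs: maximal consecutive runs of lines sharing the same blankness
def pvSplitRuns (lines : List String) : List (Bool × List String) :=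
  lines.foldl pvPushLine []

-- kept.extend([""] if blank else run)
def pvEmit (runs : List (Bool × List String)) : List String :=
  runs.foldl (fun acc p => acc ++ (if p.1 then [""] else p.2)) []

def clean_page_text_arr_py_alt (text_arr : List (List String)) : String :=
  match PySem.List.min? (text_arr.map pvNumLeftB) (fun x => x) with
  | none => ""   -- unreachable: min raises ValueError on an empty text_arr (excluded by Pre_)
  | some off =>
    let cleaned := text_arr.map (fun line =>
      PySem.Str.rstrip (PySem.Str.join "" (PySem.List.slice line (some off) none)))
    let kept := pvEmit (pvSplitRuns cleaned)
    PySem.Str.rstrip (PySem.Str.join "\n" kept) ++ "\n" ++ String.ofList (PySem.List.pyRepeat ['='] 87)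

-- ===== PRECONDITION & SPEC =====
-- Python's min(...) raises ValueError on an empty text_arr (in both A and B), so it is excluded.
def Pre_clean_page_text_arr_py (text_arr : List (List String)) : Prop := text_arr ≠ []
instance (text_arr : List (List String)) : Decidable (Pre_clean_page_text_arr_py text_arr) := by unfold Pre_clean_page_text_arr_py; infer_instance
def pvWitness_clean_page_text_arr_py : List (List String) := [["a", " "], [" ", "b"]]

def Spec_clean_page_text_arr_py (text_arr : List (List String)) (out : String) : Prop := out = clean_page_text_arr_py_alt text_arr
instance (text_arr : List (List String)) (out : String) : Decidable (Spec_clean_page_text_arr_py text_arr out) := by unfold Spec_clean_page_text_arr_py; infer_instance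

-- ===== CLAIM (what is proved, stated in full; the proofs are below) =====
def Claim_equal_clean_page_text_arr_py : Prop := ∀ (text_arr : List (List String)), Dom_clean_page_text_arr_py text_arr → Pre_clean_page_text_arr_py text_arr → Spec_clean_page_text_arr_py text_arr (clean_page_text_arr_py text_arr)

-- ===== LEMMAS AND PROOFS =====

-- the two left-offset computations agree (identical recursions)
theorem pvOffset_eq (line : List String) : pvNumLeftWhiteSpaces line = pvNumLeftB line := by
  induction line with
  | nil => simp [pvNumLeftWhiteSpaces, pvNumLeftB]
  | cons c rest ih => simp [pvNumLeftWhiteSpaces, pvNumLeftB, ih]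

-- strip of a single char is empty iff the char is whitespace
theorem pvStrip_singleton (c : Char) :
    (PySem.Chars.strip [c]).isEmpty = PySem.Chars.isspace c := by
  by_cases h : PySem.Chars.isspace c = true <;>
    simp [PySem.Chars.strip, PySem.Chars.lstrip, PySem.Chars.rstrip, List.dropWhile, h]

theorem pvOfList_bne (cs : List Char) : (String.ofList cs != "") = !cs.isEmpty := by
  by_cases h : cs = []
  · subst h; decide
  · have hne : String.ofList cs ≠ "" := by
      intro he
      have := congrArg String.toList he
      simp [String.toList_ofList] at this
      exact h this
    have h2 : cs.isEmpty = false := by simpa using h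
    simp [bne_iff_ne, hne, h2]

theorem pvDropWhile_head_false {p : Char → Bool} :
    ∀ (l : List Char) (x : Char) (xs : List Char), l.dropWhile p = x :: xs → p x = false := by
  intro l
  induction l with
  | nil => intro x xs h; simp [List.dropWhile] at h
  | cons a t ih =>
    intro x xs h
    by_cases hp : p a = true
    · rw [List.dropWhile_cons_of_pos hp] at h; exact ih _ _ h
    · rw [List.dropWhile_cons_of_neg (by simpa using hp)] at h
      obtain ⟨rfl, -⟩ := List.cons.inj h
      simpa using hp

-- a non-blank test on an rstripped string is just a non-emptiness test
theorem pvNonBlank_rstrip (s : String) :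
    pvNonBlankLine (PySem.Str.rstrip s) = (PySem.Str.rstrip s != "") := by
  simp only [pvNonBlankLine, PySem.Str.rstrip, String.toList_ofList, pvOfList_bne]
  cases hd : List.dropWhile PySem.Chars.isspace s.toList.reverse with
  | nil => simp [PySem.Chars.rstrip, hd]
  | cons x xs =>
    have hx : PySem.Chars.isspace x = false := pvDropWhile_head_false _ _ _ hd
    simp [PySem.Chars.rstrip, hd, List.any_reverse, pvStrip_singleton, hx]

-- reference recursion for the kept lines (used only in proofs)
def pvRef : List String → Bool → List String
  | [], _ => []
  | t :: rest, prev => (if t != "" || !prev then [t] else []) ++ pvRef rest (t == "")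

theorem pvLoopA_eq_ref (n : Int) (lines : List (List String)) (acc : List String) (prev : Bool) :
    pvLoopA n lines acc prev = acc ++ pvRef (lines.map (pvCleanLine n)) prev := by
  induction lines generalizing acc prev with
  | nil => simp [pvLoopA, pvRef]
  | cons line rest ih =>
    have hnb : pvNonBlankLine (pvCleanLine n line) = (pvCleanLine n line != "") :=
      pvNonBlank_rstrip _
    have hnb0 : pvNonBlankLine "" = false := by decide
    by_cases hc : pvCleanLine n line = ""
    · simp only [pvLoopA, List.map_cons, pvRef, ih, hc, hnb0]
      cases prev <;> simp
    · have hb : (pvCleanLine n line == "") = false := by simpa using hc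
      simp only [pvLoopA, hnb, List.map_cons, pvRef, ih, bne, hb]
      simp

-- blankness of the last run (the state B's grouping carries implicitly)
def pvPrevOf (runs : List (Bool × List String)) : Bool :=
  match runs.getLast? with
  | some (b, _) => b
  | none => false

theorem pvEmit_flat (runs : List (Bool × List String)) :
    pvEmit runs = runs.flatMap (fun p => if p.1 then [""] else p.2) := by
  simpa [pvEmit] using
    PySem.List.foldl_append_eq_flatMap (fun p : Bool × List String => if p.1 then [""] else p.2) runs []

theorem pvEmit_concat (runs : List (Bool × List String)) (r : Bool × List String) :
    pvEmit (runs ++ [r]) = pvEmit runs ++ (if r.1 then [""] else r.2) := by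
  simp [pvEmit_flat]

theorem pvPrevOf_push (runs : List (Bool × List String)) (line : String) :
    pvPrevOf (pvPushLine runs line) = (line == "") := by
  rcases List.eq_nil_or_concat runs with h | ⟨init, r, h⟩
  · subst h; simp [pvPushLine, pvPrevOf]
  · subst h
    obtain ⟨b, run⟩ := r
    simp only [pvPushLine]
    by_cases hb : b = (line == "")
    · simp [hb, pvPrevOf]
    · have : (b == (line == "")) = false := by simpa using hb
      simp [this, pvPrevOf]

theorem pvEmit_push (runs : List (Bool × List String)) (line : String) :
    pvEmit (pvPushLine runs line)
      = pvEmit runs ++ (if line == "" && pvPrevOf runs then [] else [line]) := by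
  rcases List.eq_nil_or_concat runs with h | ⟨init, r, h⟩
  all_goals (try rw [List.concat_eq_append] at h)
  · subst h
    by_cases hl : line = ""
    · subst hl; simp [pvPushLine, pvEmit, pvPrevOf]
    · have : (line == "") = false := by simpa using hl
      simp [pvPushLine, pvEmit, pvPrevOf, this]
  · subst h
    obtain ⟨b, run⟩ := r
    have hprev : pvPrevOf (init ++ [(b, run)]) = b := by simp [pvPrevOf]
    by_cases hb : b = (line == "")
    · have hbe : (b == (line == "")) = true := by simpa using hb
      have hstep : pvPushLine (init ++ [(b, run)]) line = init ++ [(b, run ++ [line])] := by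
        simp [pvPushLine, hbe]
      rw [hstep, pvEmit_concat init ((b, run ++ [line])), pvEmit_concat init ((b, run)), hprev]
      by_cases hl : line = ""
      · subst hl
        have hbt : b = true := by simpa using hb
        subst hbt
        simp
      · have hlf : (line == "") = false := by simpa using hl
        have hbf : b = false := by rw [hb, hlf]
        subst hbf
        simp [hlf]
    · have hbe : (b == (line == "")) = false := by simpa using hb
      have hstep : pvPushLine (init ++ [(b, run)]) line
          = (init ++ [(b, run)]) ++ [(line == "", [line])] := by
        simp [pvPushLine, hbe]
      rw [hstep, pvEmit_concat (init ++ [(b, run)]) ((line == "", [line])), hprev]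
      by_cases hl : line = ""
      · subst hl
        have hbf : b = false := by simpa using hb
        subst hbf
        simp
      · have hlf : (line == "") = false := by simpa using hl
        simp [hlf]

-- B's grouped emission equals A's online state machine
theorem pvEmit_foldl (lines : List String) (runs : List (Bool × List String)) :
    pvEmit (List.foldl pvPushLine runs lines) = pvEmit runs ++ pvRef lines (pvPrevOf runs) := by
  induction lines generalizing runs with
  | nil => simp [pvRef]
  | cons line rest ih =>
    simp only [List.foldl_cons, ih, pvPrevOf_push, pvEmit_push, pvRef, List.append_assoc]
    congr 1
    congr 1
    by_cases hl : line = "" <;> by_cases hp : pvPrevOf runs = true <;>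
      simp [hl, hp]

theorem pvEmit_splitRuns (lines : List String) :
    pvEmit (pvSplitRuns lines) = pvRef lines false := by
  have := pvEmit_foldl lines []
  simpa [pvSplitRuns, pvEmit, pvPrevOf] using this

theorem pvSep_eq : String.ofList (PySem.List.pyRepeat ['='] 87) = pvSeparator := by decide

-- ===== VERDICT (by name: the statement is the Claim_ definition above) =====
theorem clean_page_text_arr_py_spec : Claim_equal_clean_page_text_arr_py := by
  intro ta hdom hpre
  unfold Spec_clean_page_text_arr_py clean_page_text_arr_py clean_page_text_arr_py_alt
  have hoff : pvNumLeftWhiteSpaces = pvNumLeftB := funext pvOffset_eq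
  rw [hoff]
  cases hmin : PySem.List.min? (ta.map pvNumLeftB) (fun x => x) with
  | none => rfl
  | some n =>
    have hclean : (fun line => PySem.Str.rstrip (PySem.Str.join "" (PySem.List.slice line (some n) none))) = pvCleanLine n := rfl
    simp only [hclean]
    rw [pvLoopA_eq_ref, pvEmit_splitRuns, pvSep_eq]
    rfl
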